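-- pv_equiv track=rewrite | github.com/madhav-gfn/teacher_ji | backend/rag/ingest.py | find_balanced_boundary
-- ===== SOURCE A (Python) =====
-- MIN_CHARS = 200
--
-- MAX_CHARS = 800
--
-- def find_balanced_boundary(text: str) -> int:
--     max_first = min(MAX_CHARS, len(text) - MIN_CHARS)
--     if max_first < MIN_CHARS:
--         return max_first
--
--     for idx in range(max_first, MIN_CHARS - 1, -1):
--         if text[idx] in ".!?":
--             return idx + 1
--
--     for idx in range(max_first, MIN_CHARS - 1, -1):
--         if text[idx].isspace():
--             return idx
--
--     return max_first
-- ===== SOURCE B (Python) =====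
-- MIN_CHARS = 200
--
-- MAX_CHARS = 800
--
-- def find_balanced_boundary(text: str) -> int:
--     max_first = min(MAX_CHARS, len(text) - MIN_CHARS)
--     if max_first < MIN_CHARS:
--         return max_first
--
--     last_term = -1
--     last_space = -1
--     for idx in range(MIN_CHARS, max_first + 1):
--         c = text[idx]
--         if c in ".!?":
--             last_term = idx
--         if c.isspace():
--             last_space = idx
--
--     if last_term != -1:
--         return last_term + 1
--     if last_space != -1:
--         return last_space
--     return max_first
-- ===== Notes on version B (the rewrite author's own statement) =====
-- stated objective: alternative
-- what changed: Replaces A's two backward early-return scans (terminators first, then whitespace) with a single forward fold over the window that tracks the last terminator and last whitespace index with -1 sentinels, deciding the result after the loop.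
import Mathlib
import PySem

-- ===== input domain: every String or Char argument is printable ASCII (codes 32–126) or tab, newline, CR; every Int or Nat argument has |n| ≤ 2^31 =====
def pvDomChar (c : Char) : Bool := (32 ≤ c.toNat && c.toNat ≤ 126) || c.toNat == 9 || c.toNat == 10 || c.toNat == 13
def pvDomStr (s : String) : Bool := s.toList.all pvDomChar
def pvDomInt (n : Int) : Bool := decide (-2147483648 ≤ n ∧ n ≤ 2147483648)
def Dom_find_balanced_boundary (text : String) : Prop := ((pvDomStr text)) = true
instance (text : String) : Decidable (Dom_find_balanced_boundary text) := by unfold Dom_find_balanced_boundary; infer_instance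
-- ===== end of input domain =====

-- B replaces A's two backward early-return scans by one forward pass tracking the last
-- terminator / last whitespace index (alternative decomposition, same cost).

-- ===== PORT A =====
-- text[idx]; every use below has 0 ≤ idx < len(text), so the default is unreachable
def pvCharAt (text : String) (i : Int) : Char := (PySem.Str.pyGet? text i).getD ' '

def pvIsTerm (c : Char) : Bool := c = '.' || c = '!' || c = '?'

-- first backward loop: return idx + 1 at the first terminator
def fbbLoopTerm (text : String) : List Int → Option Int
  | [] => none
  | i :: rest => if pvIsTerm (pvCharAt text i) then some (i + 1) else fbbLoopTerm text rest

-- second backward loop: return idx at the first whitespace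
def fbbLoopSpace (text : String) : List Int → Option Int
  | [] => none
  | i :: rest => if PySem.Chars.isspace (pvCharAt text i) then some i else fbbLoopSpace text rest

def find_balanced_boundary (text : String) : Int :=
  let max_first := min 800 (PySem.Str.len text - 200)
  if max_first < 200 then max_first
  else
    match fbbLoopTerm text (PySem.List.pyRange max_first 199 (-1)) with
    | some r => r
    | none =>
      match fbbLoopSpace text (PySem.List.pyRange max_first 199 (-1)) with
      | some r => r
      | none => max_first

-- ===== PORT B =====
def fbbStep (text : String) (st : Int × Int) (idx : Int) : Int × Int :=
  let c := pvCharAt text idx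
  let st1 := if pvIsTerm c then (idx, st.2) else st
  if PySem.Chars.isspace c then (st1.1, idx) else st1

def find_balanced_boundary_alt (text : String) : Int :=
  let max_first := min 800 (PySem.Str.len text - 200)
  if max_first < 200 then max_first
  else
    let st := (PySem.List.pyRange 200 (max_first + 1) 1).foldl (fbbStep text) (-1, -1)
    if st.1 ≠ -1 then st.1 + 1
    else if st.2 ≠ -1 then st.2
    else max_first

-- ===== PRECONDITION & SPEC =====
def Spec_find_balanced_boundary (text : String) (out : Int) : Prop := out = find_balanced_boundary_alt text
instance (text : String) (out : Int) : Decidable (Spec_find_balanced_boundary text out) := by unfold Spec_find_balanced_boundary; infer_instance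

-- ===== CLAIM (what is proved, stated in full; the proofs are below) =====
def Claim_equal_find_balanced_boundary : Prop := ∀ (text : String), Dom_find_balanced_boundary text → Spec_find_balanced_boundary text (find_balanced_boundary text)

-- ===== LEMMAS AND PROOFS =====

-- A's early-return loops are List.find? in disguise
theorem fbbLoopTerm_eq_find? (text : String) (l : List Int) :
    fbbLoopTerm text l = (l.find? (fun i => pvIsTerm (pvCharAt text i))).map (· + 1) := by
  induction l with
  | nil => rfl
  | cons i rest ih => simp [fbbLoopTerm, List.find?]; split_ifs with h <;> simp [h, ih]

theorem fbbLoopSpace_eq_find? (text : String) (l : List Int) :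
    fbbLoopSpace text l = l.find? (fun i => PySem.Chars.isspace (pvCharAt text i)) := by
  induction l with
  | nil => rfl
  | cons i rest ih => simp [fbbLoopSpace, List.find?]; split_ifs with h <;> simp [h, ih]

-- B's paired fold splits into two independent "last hit" folds
theorem fbbStep_foldl_split (text : String) (l : List Int) (a b : Int) :
    l.foldl (fbbStep text) (a, b) =
      (l.foldl (fun acc i => if pvIsTerm (pvCharAt text i) then i else acc) a,
       l.foldl (fun acc i => if PySem.Chars.isspace (pvCharAt text i) then i else acc) b) := by
  induction l generalizing a b with
  | nil => rfl
  | cons i rest ih =>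
    simp only [List.foldl_cons, ih]
    congr 1 <;> simp [fbbStep] <;> split_ifs <;> rfl

-- a "last hit" fold is the first hit of the reversed list
theorem foldl_last_hit (p : Int → Bool) (l : List Int) (a : Int) :
    l.foldl (fun acc i => if p i then i else acc) a =
      (l.reverse.find? p).getD a := by
  induction l using List.reverseRecOn generalizing a with
  | nil => rfl
  | append_singleton l x ih =>
    simp only [List.foldl_append, List.foldl_cons, List.foldl_nil, List.reverse_append,
      List.reverse_cons, List.reverse_nil, List.nil_append, List.cons_append, List.find?]
    split_ifs with h <;> simp [h, ih]

-- ===== VERDICT (by name: the statement is the Claim_ definition above) =====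
theorem find_balanced_boundary_spec : Claim_equal_find_balanced_boundary := by
  intro text _
  unfold Spec_find_balanced_boundary find_balanced_boundary find_balanced_boundary_alt
  set m := min 800 (PySem.Str.len text - 200) with hm
  by_cases hlt : m < 200
  · simp [hlt]
  · simp only [hlt, if_false]
    rw [PySem.List.pyRange_neg_one_eq_reverse]
    have h199 : (199 : Int) + 1 = 200 := by norm_num
    rw [h199]
    rw [fbbLoopTerm_eq_find?, fbbLoopSpace_eq_find?,
      fbbStep_foldl_split, foldl_last_hit, foldl_last_hit]
    cases hT : ((PySem.List.pyRange 200 (m + 1) 1).reverse.find?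
        (fun i => pvIsTerm (pvCharAt text i))) with
    | some i =>
      have hi : (200 : Int) ≤ i := by
        have := List.mem_of_find?_eq_some hT
        rw [List.mem_reverse] at this
        exact ((PySem.List.mem_pyRange_one).mp this).1
      simp only [Option.map_some, Option.getD_some]
      have : i ≠ -1 := by omega
      simp [this]
    | none =>
      simp only [Option.map_none, Option.getD_none]
      cases hS : ((PySem.List.pyRange 200 (m + 1) 1).reverse.find?
          (fun i => PySem.Chars.isspace (pvCharAt text i))) with
      | some j =>
        have hj : (200 : Int) ≤ j := by
          have := List.mem_of_find?_eq_some hS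
          rw [List.mem_reverse] at this
          exact ((PySem.List.mem_pyRange_one).mp this).1
        have : j ≠ -1 := by omega
        simp [this]
      | none => simp
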